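-- pv_equiv track=rewrite | github.com/Ranger22343/mceh | mceh/utility.py | cut_range
-- ===== SOURCE A (Python) =====
-- def cut_range(num, bin_num):
--     """Evenly distribute range(`num`) in given bins.
--
--     range(`num`) will be created and numbers in it will be evenly distributed
--     in `bin_num` bins and these bins will be returned.
--
--     Args:
--         num (int): Length of the numbers (start at 0).
--         bin_num (int): Number of bins to ditribute the numbers.
--     Returns:
--         list: Every element represents the numbers in this bin.
--             Ex: [[0, 1, 2], [3, 4, 5], [6, 7]]
--     """
--     returnme = [[] for i in range(bin_num)]
--     width = num // bin_num
--     redundant_num = num - bin_num * width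
--     finish_num = 0
--     for i in range(bin_num):
--         if redundant_num != 0:
--             returnme[i] = list(range(finish_num, finish_num + width + 1))
--             redundant_num -= 1
--             finish_num += width + 1
--         else:
--             returnme[i] = list(range(finish_num, finish_num + width))
--             finish_num += width
--     return returnme
-- ===== SOURCE B (Python) =====
-- def cut_range(num, bin_num):
--     """Evenly distribute range(num) into bin_num bins (closed-form boundaries)."""
--     width = num // bin_num
--     redundant = num - bin_num * width
--     bounds = [i * width + min(i, redundant) for i in range(bin_num + 1)]
--     return [list(range(bounds[i], bounds[i + 1])) for i in range(bin_num)]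
-- ===== Notes on version B (the rewrite author's own statement) =====
-- stated objective: alternative
-- what changed: Replaced the stateful loop (running finish_num accumulator and a decrementing extra-element branch) with a closed-form boundary formula start(i) = i*width + min(i, redundant) and per-bin slices between consecutive boundaries.
import Mathlib
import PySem

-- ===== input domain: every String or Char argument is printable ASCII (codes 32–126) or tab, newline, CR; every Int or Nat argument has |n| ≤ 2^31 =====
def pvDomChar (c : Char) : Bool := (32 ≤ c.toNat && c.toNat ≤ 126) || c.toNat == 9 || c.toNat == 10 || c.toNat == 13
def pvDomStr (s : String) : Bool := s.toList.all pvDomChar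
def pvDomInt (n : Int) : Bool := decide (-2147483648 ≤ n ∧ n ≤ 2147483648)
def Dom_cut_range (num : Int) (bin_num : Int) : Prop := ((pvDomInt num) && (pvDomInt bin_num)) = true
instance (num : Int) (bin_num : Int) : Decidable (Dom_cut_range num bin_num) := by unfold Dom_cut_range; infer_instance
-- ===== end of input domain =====

-- B replaces A's running-accumulator loop by closed-form bin boundaries i*width + min(i, redundant); alternative decomposition, same cost.


-- ===== PORT A =====
-- the body of A's for-loop: state = (returnme, redundant_num, finish_num)
def cutBody (width : Int) (s : List (List Int) × Int × Int) (i : Int) : List (List Int) × Int × Int :=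
  if s.2.1 ≠ 0 then
    (PySem.List.pySetD s.1 i (PySem.List.pyRange s.2.2 (s.2.2 + width + 1) 1), s.2.1 - 1, s.2.2 + width + 1)
  else
    (PySem.List.pySetD s.1 i (PySem.List.pyRange s.2.2 (s.2.2 + width) 1), s.2.1, s.2.2 + width)

def cut_range (num : Int) (bin_num : Int) : List (List Int) :=
  let returnme : List (List Int) := (PySem.List.pyRange 0 bin_num 1).map (fun _ => [])
  let width := PySem.Int.floordiv num bin_num
  let redundant_num := num - bin_num * width
  ((PySem.List.pyRange 0 bin_num 1).foldl (cutBody width) (returnme, redundant_num, 0)).1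

-- ===== PORT B =====
def cut_range_alt (num : Int) (bin_num : Int) : List (List Int) :=
  let width := PySem.Int.floordiv num bin_num
  let redundant := num - bin_num * width
  let bounds := (PySem.List.pyRange 0 (bin_num + 1) 1).map (fun i => i * width + min i redundant)
  (PySem.List.pyRange 0 bin_num 1).map
    (fun i => PySem.List.pyRange (PySem.List.pyGetD bounds i 0) (PySem.List.pyGetD bounds (i + 1) 0) 1)

-- ===== PRECONDITION & SPEC =====
-- Pre_ excludes exactly bin_num = 0, where A (and B) raise ZeroDivisionError on 'num // bin_num'.
def Pre_cut_range (num : Int) (bin_num : Int) : Prop := bin_num ≠ 0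
instance (num : Int) (bin_num : Int) : Decidable (Pre_cut_range num bin_num) := by unfold Pre_cut_range; infer_instance
def pvWitness_cut_range : Int × Int := (8, 3)

def Spec_cut_range (num : Int) (bin_num : Int) (out : List (List Int)) : Prop := out = cut_range_alt num bin_num
instance (num : Int) (bin_num : Int) (out : List (List Int)) : Decidable (Spec_cut_range num bin_num out) := by unfold Spec_cut_range; infer_instance

-- ===== CLAIM (what is proved, stated in full; the proofs are below) =====
def Claim_equal_cut_range : Prop := ∀ (num : Int) (bin_num : Int), Dom_cut_range num bin_num → Pre_cut_range num bin_num → Spec_cut_range num bin_num (cut_range num bin_num)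

-- ===== LEMMAS AND PROOFS =====

-- the closed-form bin: numbers from start(j) to start(j+1) with start(j) = j*w + min(j, r)
def binf (w r j : Int) : List Int :=
  PySem.List.pyRange (j * w + min j r) ((j + 1) * w + min (j + 1) r) 1

theorem pySetD_eq_set {α : Type} (xs : List α) (k : Nat) (h : k < xs.length) (v : α) :
    PySem.List.pySetD xs (k : Int) v = xs.set k v := by
  simp [PySem.List.pySetD, PySem.List.pySet?, PySem.List.pyIdx?, h]

theorem set_map_pyRange {α : Type} (g g' : Int → α) (n : Int) (k : Nat) (hk : (k : Int) < n)
    (hsame : ∀ j : Int, 0 ≤ j → j < n → j ≠ (k : Int) → g j = g' j) (v : α) (hv : v = g' (k : Int)) :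
    ((PySem.List.pyRange 0 n 1).map g).set k v = (PySem.List.pyRange 0 n 1).map g' := by
  apply List.ext_getElem
  · simp
  · intro j h1 h2
    rw [List.length_map, PySem.List.length_pyRange_one] at h2
    have hjn : (j : Int) < n := by omega
    rw [List.getElem_set]
    by_cases hkj : k = j
    · subst hkj
      simp [PySem.List.getElem_pyRange_one, hv]
    · simp only [hkj, if_false, List.getElem_map, PySem.List.getElem_pyRange_one]
      exact hsame _ (by omega) (by omega) (by omega)

theorem loop_inv (w r n : Int) (hn : 0 < n) (hr0 : 0 ≤ r) (k : Nat) (hk : (k : Int) ≤ n) :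
    (PySem.List.pyRange 0 (k : Int) 1).foldl (cutBody w)
      ((PySem.List.pyRange 0 n 1).map (fun _ => ([] : List Int)), r, 0)
    = ((PySem.List.pyRange 0 n 1).map (fun j => if j < (k : Int) then binf w r j else []),
       r - min (k : Int) r, (k : Int) * w + min (k : Int) r) := by
  induction k with
  | zero =>
      simp only [Int.natCast_zero]
      rw [PySem.List.pyRange_one_eq_nil (le_refl 0)]
      simp only [List.foldl_nil]
      refine Prod.ext ?_ (Prod.ext ?_ ?_)
      · apply List.map_congr_left
        intro j hj
        have := (PySem.List.mem_pyRange_one).1 hj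
        rw [if_neg (by omega)]
      · simp only []; omega
      · simp only [zero_mul]; omega
  | succ k ih =>
      have hk' : (k : Int) ≤ n := by push_cast at hk ⊢; omega
      have hkn : (k : Int) < n := by push_cast at hk; omega
      have hcast : ((k + 1 : Nat) : Int) = (k : Int) + 1 := by push_cast; ring
      rw [hcast, PySem.List.pyRange_one_succ_right (by omega), List.foldl_append,
        List.foldl_cons, List.foldl_nil, ih hk']
      have hlen : (k : Nat) < ((PySem.List.pyRange 0 n 1).map
          (fun j => if j < (k : Int) then binf w r j else [])).length := by
        simp [PySem.List.length_pyRange_one]; omega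
      by_cases hkr : (k : Int) < r
      · have hmin : min (k : Int) r = (k : Int) := by omega
        have hmin' : min ((k : Int) + 1) r = (k : Int) + 1 := by omega
        rw [cutBody]
        simp only [hmin, if_pos (by omega : r - (k : Int) ≠ 0)]
        refine Prod.ext ?_ (Prod.ext ?_ ?_)
        · simp only
          rw [pySetD_eq_set _ _ hlen]
          apply set_map_pyRange _ _ _ _ hkn
          · intro j _ _ hj
            rcases lt_or_gt_of_ne hj with h | h
            · rw [if_pos h, if_pos (by omega)]
            · rw [if_neg (by omega), if_neg (by omega)]
          · rw [if_pos (by omega)]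
            unfold binf
            rw [hmin, hmin']
            congr 1 <;> ring
        · simp only [hmin, hmin']; ring
        · simp only [hmin, hmin']; ring
      · have hmin : min (k : Int) r = r := by omega
        have hmin' : min ((k : Int) + 1) r = r := by omega
        rw [cutBody]
        simp only [hmin, sub_self, ne_eq, not_true_eq_false, if_false]
        refine Prod.ext ?_ (Prod.ext ?_ ?_)
        · simp only
          rw [pySetD_eq_set _ _ hlen]
          apply set_map_pyRange _ _ _ _ hkn
          · intro j _ _ hj
            rcases lt_or_gt_of_ne hj with h | h
            · rw [if_pos h, if_pos (by omega)]
            · rw [if_neg (by omega), if_neg (by omega)]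
          · rw [if_pos (by omega)]
            unfold binf
            rw [hmin, hmin']
            congr 1 <;> ring
        · simp only [hmin']; omega
        · simp only [hmin, hmin']; ring

-- ===== VERDICT (by name: the statement is the Claim_ definition above) =====
theorem cut_range_spec : Claim_equal_cut_range := by
  intro num bin_num _ hpre
  unfold Spec_cut_range cut_range cut_range_alt
  by_cases hn : 0 < bin_num
  · set w := PySem.Int.floordiv num bin_num with hw
    set r := num - bin_num * w with hr
    have hwe : w = num / bin_num := PySem.Int.floordiv_eq_ediv_of_pos hn
    have hr0 : 0 ≤ r := by
      rw [hr, hwe]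
      have := Int.emod_nonneg num (by omega : bin_num ≠ 0)
      rw [Int.emod_def] at this; omega
    have hcast : ((bin_num.toNat : Nat) : Int) = bin_num := Int.toNat_of_nonneg (by omega)
    have hinv := loop_inv w r bin_num hn hr0 bin_num.toNat (by omega)
    rw [hcast] at hinv
    simp only
    rw [hinv]
    simp only
    apply List.map_congr_left
    intro i hi
    have hmem := (PySem.List.mem_pyRange_one).1 hi
    rw [if_pos (by omega)]
    unfold binf
    rw [PySem.List.pyGetD_map_pyRange_of_nonneg _ _ _ _ (by omega) (by omega),
      PySem.List.pyGetD_map_pyRange_of_nonneg _ _ _ _ (by omega) (by omega)]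
  · rw [PySem.List.pyRange_one_eq_nil (by omega : bin_num ≤ (0:Int))]
    simp
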